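-- pv_equiv track=rewrite | github.com/i960107/algorithm-study | soohyun/week9/미로탈출.py | solution
-- ===== SOURCE A (Python) =====
-- from typing import List
-- from collections import defaultdict
-- import heapq
--
-- def solution(n: int, start: int, end: int, roads: List[List[int]], traps: List[int]) -> int:
--     INF = int(1e9)
--     T = len(traps)
--
--     adj = defaultdict(list)
--     for u, v, w in roads:
--         adj[u].append((v, w, False))
--         adj[v].append((u, w, True))
--
--     distance = [[INF] * (1 << T) for _ in range(n + 1)]
--     distance[start][0] = 0
--
--     # 노드번호: id
--     trap_ids = dict()
--     for index, trap in enumerate(traps):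
--         trap_ids[trap] = index
--
--     queue = [(0, start, 0b0)]
--
--     while queue:
--         dist, now, trapped = heapq.heappop(queue)
--
--         if distance[now][trapped] < dist:
--             continue
--
--         is_now_trapped = (now in trap_ids and (trapped & (1 << trap_ids[now])))
--
--         # trap on/off = bitmask ^ (1<<trap_id)
--         # is_trap_on = bitmaks & (1<<trap_id)
--         for nxt, cost, is_reversed in adj[now]:
--             is_nxt_trapped = (nxt in trap_ids and (trapped & (1 << trap_ids[nxt])))
--             nxt_trapped = trapped
--             if nxt in trap_ids:
--                 nxt_trapped = trapped ^ (1 << trap_ids[nxt])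
--             nxt_dist = dist + cost
--             if (is_now_trapped and is_nxt_trapped) or (not is_now_trapped and not is_nxt_trapped):
--                 if is_reversed:
--                     continue
--             else:
--                 if not is_reversed:
--                     continue
--             if distance[nxt][nxt_trapped] <= nxt_dist:
--                 continue
--             distance[nxt][nxt_trapped] = nxt_dist
--             heapq.heappush(queue, (nxt_dist, nxt, nxt_trapped))
--
--     min_distance = INF
--
--     for dist in distance[end]:
--         if dist < min_distance:
--             min_distance = dist
--
--     return min_distance
-- ===== SOURCE B (Python) =====
-- from typing import List
-- from collections import defaultdict, deque
--
-- def solution(n: int, start: int, end: int, roads: List[List[int]], traps: List[int]) -> int: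
--     # SPFA (Bellman-Ford with a FIFO worklist): relax states from a deque with an
--     # in-queue marker set instead of extracting minima from a priority heap.
--     INF = int(1e9)
--     T = len(traps)
--     trap_ids = {t: i for i, t in enumerate(traps)}
--     adj = defaultdict(list)
--     for u, v, w in roads:
--         adj[u].append((v, w, False))
--         adj[v].append((u, w, True))
--     distance = [[INF] * (1 << T) for _ in range(n + 1)]
--     distance[start][0] = 0
--     queue = deque([(start, 0)])
--     in_queue = {(start, 0)}
--     while queue:
--         now, trapped = queue.popleft()
--         in_queue.discard((now, trapped))
--         dist = distance[now][trapped]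
--         now_trapped = now in trap_ids and bool(trapped & (1 << trap_ids[now]))
--         for nxt, cost, is_rev in adj[now]:
--             nxt_trapped = nxt in trap_ids and bool(trapped & (1 << trap_ids[nxt]))
--             if (now_trapped == nxt_trapped) == is_rev:
--                 continue
--             nmask = trapped ^ (1 << trap_ids[nxt]) if nxt in trap_ids else trapped
--             nd = dist + cost
--             if nd < distance[nxt][nmask]:
--                 distance[nxt][nmask] = nd
--                 if (nxt, nmask) not in in_queue:
--                     in_queue.add((nxt, nmask))
--                     queue.append((nxt, nmask))
--     return min(distance[end])
-- ===== Notes on version B (the rewrite author's own statement) =====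
-- stated objective: alternative
-- what changed: Replaces the heapq-based Dijkstra over (node, trap-mask) states by SPFA (Bellman-Ford with a FIFO worklist): a deque plus an in-queue marker set, no distances stored in the queue and no stale-entry skip; with nonnegative road weights both converge to the same unique stable distance table, so the returned minimum is identical.
-- outside the precondition, e.g. on solution(2, 0, 0, [[0, 1, 1], [5, 7, 1]], []): A returns 0, B returns 0; on solution(1, 0, 0, [[0, -2, 7]], []): A returns 0, B returns 0; on solution(1, 0, 1, [[0, 1, -5]], []): A returns -5, B returns -5
import Mathlib
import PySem

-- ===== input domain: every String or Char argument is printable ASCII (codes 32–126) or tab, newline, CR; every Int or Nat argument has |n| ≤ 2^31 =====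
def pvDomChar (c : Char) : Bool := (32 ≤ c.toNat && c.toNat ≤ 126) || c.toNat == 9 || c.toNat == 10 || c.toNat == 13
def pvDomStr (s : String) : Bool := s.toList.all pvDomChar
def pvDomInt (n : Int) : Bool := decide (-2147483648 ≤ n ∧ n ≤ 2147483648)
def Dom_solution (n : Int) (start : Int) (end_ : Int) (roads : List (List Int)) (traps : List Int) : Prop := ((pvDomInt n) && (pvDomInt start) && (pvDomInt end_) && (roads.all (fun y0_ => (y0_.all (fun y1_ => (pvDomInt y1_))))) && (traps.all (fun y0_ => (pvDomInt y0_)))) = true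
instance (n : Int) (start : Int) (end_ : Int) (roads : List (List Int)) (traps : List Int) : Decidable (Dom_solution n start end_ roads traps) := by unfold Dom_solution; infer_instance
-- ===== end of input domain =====

-- B replaces A's heapq-based Dijkstra over (node, trap-mask) states by SPFA
-- (Bellman-Ford with a FIFO worklist and an in-queue marker set); with the
-- nonnegative weights admitted by Pre_ both relaxations reach the same unique
-- stable distance table (objective: alternative).

-- Helpers shared by both ports (both Pythons build these identically):
-- the distance table distance[u][mask] is ported as a function Int → Nat → Int;
-- pyNorm models Python's list indexing of the length-(n+1) table: a negative
-- in-range index wraps to x + (n+1) (out-of-range labels, where Python raises,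
-- keep their own key — Python returns nothing there, so nothing is compared).
def pyNorm (n x : Int) : Int := if 0 ≤ x then x else if -(n + 1) ≤ x then x + (n + 1) else x

def updD (d : Int → Nat → Int) (u : Int) (m : Nat) (v : Int) : Int → Nat → Int :=
  fun x y => if x = u ∧ y = m then v else d x y

-- trap_ids: dict built by enumeration, later occurrences overwrite earlier ones
def mkTrapIdsAux (f : Int → Option Nat) (i : Nat) : List Int → (Int → Option Nat)
  | [] => f
  | t :: ts => mkTrapIdsAux (fun x => if x = t then some i else f x) (i + 1) ts

def mkTrapIds (traps : List Int) : Int → Option Nat := mkTrapIdsAux (fun _ => none) 0 traps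

-- x in trap_ids and (mask & (1 << trap_ids[x]))
def isTrapped (tid : Int → Option Nat) (x : Int) (m : Nat) : Bool :=
  match tid x with
  | some i => (m &&& (1 <<< i)) != 0
  | none => false

-- trapped ^ (1 << trap_ids[v]) if v in trap_ids else trapped
def newMask (tid : Int → Option Nat) (v : Int) (m : Nat) : Nat :=
  match tid v with
  | some i => m ^^^ (1 <<< i)
  | none => m

-- adj = defaultdict(list); for u,v,w in roads: adj[u].append((v,w,False)); adj[v].append((u,w,True))
def adjStep (f : Int → List (Int × Int × Bool)) (r : List Int) : Int → List (Int × Int × Bool) :=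
  match r with
  | [u, v, w] =>
    let f1 := fun x => if x = u then f x ++ [(v, w, false)] else f x
    fun x => if x = v then f1 x ++ [(u, w, true)] else f1 x
  | _ => f

def aAdj (roads : List (List Int)) : Int → List (Int × Int × Bool) :=
  roads.foldl adjStep (fun _ => [])

-- ===== PORT A =====
-- lexicographic order of the Python tuples (dist, node, mask) that heapq compares by
def entLe (a b : Int × Int × Nat) : Bool :=
  a.1 < b.1 || (a.1 == b.1 && (a.2.1 < b.2.1 || (a.2.1 == b.2.1 && a.2.2 ≤ b.2.2)))

-- heapq.heappop: removes and returns the smallest tuple (entries that compare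
-- equal are identical tuples, so this is heapq's popped value exactly)
def popMin : List (Int × Int × Nat) → Option ((Int × Int × Nat) × List (Int × Int × Nat))
  | [] => none
  | x :: xs =>
    match popMin xs with
    | none => some (x, [])
    | some (m, rest) => if entLe x m then some (x, xs) else some (m, x :: rest)

-- one iteration of the inner `for nxt, cost, is_reversed in adj[now]` loop of A
def aStep (tid : Int → Option Nat) (n p : Int) (trapped : Nat) (nowT : Bool)
    (dq : (Int → Nat → Int) × List (Int × Int × Nat)) (nb : Int × Int × Bool) :
    (Int → Nat → Int) × List (Int × Int × Nat) :=
  let nxtT := isTrapped tid nb.1 trapped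
  let nmask := newMask tid nb.1 trapped
  let nd := p + nb.2.1
  if ((nowT && nxtT) || (!nowT && !nxtT)) == nb.2.2 then dq
  else if nd < dq.1 (pyNorm n nb.1) nmask then
    (updD dq.1 (pyNorm n nb.1) nmask nd, dq.2 ++ [(nd, nb.1, nmask)])
  else dq

-- the inner `for nxt, cost, is_reversed in adj[now]` loop of A (heappush = append)
def aRelax (tid : Int → Option Nat) (n p : Int) (trapped : Nat) (nowT : Bool)
    (nbrs : List (Int × Int × Bool))
    (dq : (Int → Nat → Int) × List (Int × Int × Nat)) :
    (Int → Nat → Int) × List (Int × Int × Nat) :=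
  nbrs.foldl (aStep tid n p trapped nowT) dq

-- the `while queue` loop of A; the fuel bounds the iteration count (every push
-- strictly decreases one distance entry, so runs the Python finishes fit in it)
def aLoop (adj : Int → List (Int × Int × Bool)) (tid : Int → Option Nat) (n : Int) :
    Nat → (Int → Nat → Int) → List (Int × Int × Nat) → (Int → Nat → Int)
  | 0, d, _ => d
  | fuel + 1, d, q =>
    match popMin q with
    | none => d
    | some (e, rest) =>
      if d (pyNorm n e.2.1) e.2.2 < e.1 then aLoop adj tid n fuel d rest
      else
        let dq := aRelax tid n e.1 e.2.2 (isTrapped tid e.2.1 e.2.2) (adj e.2.1) (d, rest)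
        aLoop adj tid n fuel dq.1 dq.2

def solution (n : Int) (start : Int) (end_ : Int) (roads : List (List Int)) (traps : List Int) : Int :=
  let T := traps.length
  let tid := mkTrapIds traps
  let adj := aAdj roads
  let d0 := updD (fun _ _ => 1000000000) (pyNorm n start) 0 0
  let d := aLoop adj tid n ((n.toNat + 1) * 2 ^ T * 1000000000 + 2) d0 [(0, start, 0)]
  (List.range (2 ^ T)).foldl
    (fun acc m => if d (pyNorm n end_) m < acc then d (pyNorm n end_) m else acc) 1000000000

-- ===== PORT B =====
-- one iteration of the inner `for nxt, cost, is_rev in adj[now]` loop of B: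
-- state = (distance table, FIFO queue, in_queue marker set)
def bStep (tid : Int → Option Nat) (n dist : Int) (trapped : Nat) (nowT : Bool)
    (s : (Int → Nat → Int) × List (Int × Nat) × PySem.Set (Int × Nat)) (nb : Int × Int × Bool) :
    (Int → Nat → Int) × List (Int × Nat) × PySem.Set (Int × Nat) :=
  let nxtT := isTrapped tid nb.1 trapped
  if (nowT == nxtT) == nb.2.2 then s
  else
    let nmask := newMask tid nb.1 trapped
    let nd := dist + nb.2.1
    if nd < s.1 (pyNorm n nb.1) nmask then
      let d' := updD s.1 (pyNorm n nb.1) nmask nd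
      if PySem.Set.contains s.2.2 (nb.1, nmask) then (d', s.2.1, s.2.2)
      else (d', s.2.1 ++ [(nb.1, nmask)], PySem.Set.add s.2.2 (nb.1, nmask))
    else s

-- the inner neighbour loop of B
def bRelax (tid : Int → Option Nat) (n dist : Int) (trapped : Nat) (nowT : Bool)
    (nbrs : List (Int × Int × Bool))
    (s : (Int → Nat → Int) × List (Int × Nat) × PySem.Set (Int × Nat)) :
    (Int → Nat → Int) × List (Int × Nat) × PySem.Set (Int × Nat) :=
  nbrs.foldl (bStep tid n dist trapped nowT) s

-- the `while queue` loop of B: deque.popleft pops the front, the popped state's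
-- distance is re-read from the table (SPFA stores no distances in the queue)
def bLoop (adj : Int → List (Int × Int × Bool)) (tid : Int → Option Nat) (n : Int) :
    Nat → (Int → Nat → Int) → List (Int × Nat) → PySem.Set (Int × Nat) → (Int → Nat → Int)
  | 0, d, _, _ => d
  | fuel + 1, d, q, inq =>
    match q with
    | [] => d
    | e :: rest =>
      let inq' := PySem.Set.discard inq e
      let dist := d (pyNorm n e.1) e.2
      let s := bRelax tid n dist e.2 (isTrapped tid e.1 e.2) (adj e.1) (d, rest, inq')
      bLoop adj tid n fuel s.1 s.2.1 s.2.2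

def solution_alt (n : Int) (start : Int) (end_ : Int) (roads : List (List Int)) (traps : List Int) : Int :=
  let T := traps.length
  let tid := mkTrapIds traps
  let adj := aAdj roads
  let d0 := updD (fun _ _ => 1000000000) (pyNorm n start) 0 0
  let d := bLoop adj tid n ((n.toNat + 1) * 2 ^ T * 1000000000 + 2) d0 [(start, 0)]
    (PySem.Set.ofList [(start, 0)])
  -- min(distance[end]) of the nonempty row (2^T ≥ 1)
  match (List.range (2 ^ T)).map (fun m => d (pyNorm n end_) m) with
  | [] => 0
  | x :: xs => xs.foldl min x

-- ===== PRECONDITION & SPEC =====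
-- node labels used by the search (the two endpoints of every road)
def rdNodes (roads : List (List Int)) : List Int := roads.flatMap (fun r => r.take 2)

-- Pre_ keeps exactly the inputs on which A raises no exception AND the relaxation's
-- result is forced: every road a triple, start and end in range (negative indices
-- wrap), and — unless start lies on no road at all, in which case the search ends
-- immediately whatever the roads carry — in-range node labels, nonnegative weights,
-- and no two distinct labels naming the same distance row.  Besides the crash inputs
-- (malformed roads / out-of-range labels the search reaches raise IndexError or
-- ValueError; when unreachable A happens to return — an accident of lazy indexing),
-- it excludes inputs where wraparound aliases two distinct reachable labels to one
-- row and inputs with reachable negative weights (the worklist need not terminate;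
-- A can loop forever): on those A's value is an order-dependent accident (see cites).
def Pre_solution (n : Int) (start : Int) (end_ : Int) (roads : List (List Int)) (traps : List Int) : Prop :=
  0 ≤ n ∧ -(n + 1) ≤ start ∧ start ≤ n ∧ -(n + 1) ≤ end_ ∧ end_ ≤ n ∧
  (∀ r ∈ roads, r.length = 3) ∧
  (start ∉ rdNodes roads ∨
    ((∀ r ∈ roads, (∀ x ∈ r.take 2, -(n + 1) ≤ x ∧ x ≤ n) ∧ (∀ x ∈ r.drop 2, 0 ≤ x)) ∧
     List.Pairwise (fun x y => pyNorm n x = pyNorm n y → x = y) (start :: rdNodes roads)))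
instance (n : Int) (start : Int) (end_ : Int) (roads : List (List Int)) (traps : List Int) : Decidable (Pre_solution n start end_ roads traps) := by unfold Pre_solution; infer_instance

def pvWitness_solution : Int × Int × Int × List (List Int) × List Int :=
  (3, 0, 3, [[0, 1, 1], [1, 2, 2], [2, 3, 1], [0, 3, 9]], [2])

def Spec_solution (n : Int) (start : Int) (end_ : Int) (roads : List (List Int)) (traps : List Int) (out : Int) : Prop := out = solution_alt n start end_ roads traps
instance (n : Int) (start : Int) (end_ : Int) (roads : List (List Int)) (traps : List Int) (out : Int) : Decidable (Spec_solution n start end_ roads traps out) := by unfold Spec_solution; infer_instance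

-- ===== CLAIM (what is proved, stated in full; the proofs are below) =====
def Claim_equal_solution : Prop := ∀ (n : Int) (start : Int) (end_ : Int) (roads : List (List Int)) (traps : List Int), Dom_solution n start end_ roads traps → Pre_solution n start end_ roads traps → Spec_solution n start end_ roads traps (solution n start end_ roads traps)

-- ===== LEMMAS AND PROOFS =====

-- context facts extracted once from Pre_: label bounds, adjacency shape, trap-id
-- bound, and injectivity of row indexing (no two distinct labels share a row)
def Ctx (n start : Int) (adj : Int → List (Int × Int × Bool)) (tid : Int → Option Nat)
    (nodes : List Int) (T : Nat) : Prop :=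
  0 ≤ n ∧ -(n + 1) ≤ start ∧ start ≤ n ∧
  (∀ x ∈ nodes, -(n + 1) ≤ x ∧ x ≤ n) ∧
  (∀ u v w rev, (v, w, rev) ∈ adj u → (v ∈ nodes ∧ u ∈ nodes ∧ 0 ≤ w)) ∧
  (∀ x i, tid x = some i → i < T) ∧
  (∀ x ∈ start :: nodes, ∀ y ∈ start :: nodes, pyNorm n x = pyNorm n y → x = y)

-- values reachable from (start, 0) by chains of admissible relaxations
inductive Deriv (adj : Int → List (Int × Int × Bool)) (tid : Int → Option Nat) (start : Int) :
    Int → Nat → Int → Prop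
  | base : Deriv adj tid start start 0 0
  | step {u : Int} {m : Nat} {c v w : Int} {rev : Bool} :
      Deriv adj tid start u m c → (v, w, rev) ∈ adj u →
      ((isTrapped tid u m == isTrapped tid v m) == rev) = false →
      Deriv adj tid start v (newMask tid v m) (c + w)

-- table invariant shared by both loops: bounds, start row, derivability
def TInv (n : Int) (adj : Int → List (Int × Int × Bool)) (tid : Int → Option Nat) (start : Int)
    (nodes : List Int) (d : Int → Nat → Int) : Prop :=
  (∀ x m, 0 ≤ d x m ∧ d x m ≤ 1000000000) ∧
  d (pyNorm n start) 0 ≤ 0 ∧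
  (∀ x m, d x m = 1000000000 ∨ ∃ v, (v = start ∨ v ∈ nodes) ∧ pyNorm n v = x ∧
    Deriv adj tid start v m (d x m))

-- A's queue entries: well-shaped, nonnegative, at least the table value, derivable
def QAInv (n : Int) (adj : Int → List (Int × Int × Bool)) (tid : Int → Option Nat) (start : Int)
    (nodes : List Int) (T : Nat) (d : Int → Nat → Int) (q : List (Int × Int × Nat)) : Prop :=
  ∀ e ∈ q, (e.2.1 = start ∨ e.2.1 ∈ nodes) ∧ e.2.2 < 2 ^ T ∧ 0 ≤ e.1 ∧
    d (pyNorm n e.2.1) e.2.2 ≤ e.1 ∧ Deriv adj tid start e.2.1 e.2.2 e.1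

-- stability up to the queue, with the edges of (u0, m0) still in L excused
def StA (n : Int) (adj : Int → List (Int × Int × Bool)) (tid : Int → Option Nat)
    (d : Int → Nat → Int) (q : List (Int × Int × Nat))
    (u0 : Int) (m0 : Nat) (L : List (Int × Int × Bool)) : Prop :=
  ∀ u m v w rev, (v, w, rev) ∈ adj u →
    ((isTrapped tid u m == isTrapped tid v m) == rev) = false →
    d (pyNorm n v) (newMask tid v m) ≤ d (pyNorm n u) m + w ∨
      (d (pyNorm n u) m, u, m) ∈ q ∨ (u = u0 ∧ m = m0 ∧ (v, w, rev) ∈ L)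

-- B's queue entries: well-shaped states
def QBInv (start : Int) (nodes : List Int) (T : Nat) (q : List (Int × Nat)) : Prop :=
  ∀ e ∈ q, (e.1 = start ∨ e.1 ∈ nodes) ∧ e.2 < 2 ^ T

def StB (n : Int) (adj : Int → List (Int × Int × Bool)) (tid : Int → Option Nat)
    (d : Int → Nat → Int) (q : List (Int × Nat))
    (u0 : Int) (m0 : Nat) (L : List (Int × Int × Bool)) : Prop :=
  ∀ u m v w rev, (v, w, rev) ∈ adj u →
    ((isTrapped tid u m == isTrapped tid v m) == rev) = false →
    d (pyNorm n v) (newMask tid v m) ≤ d (pyNorm n u) m + w ∨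
      (u, m) ∈ q ∨ (u = u0 ∧ m = m0 ∧ (v, w, rev) ∈ L)

lemma sameBool (a b : Bool) : ((a && b) || (!a && !b)) = (a == b) := by
  cases a <;> cases b <;> rfl

lemma pyNorm_bounds (n x : Int) (h1 : -(n + 1) ≤ x) (h2 : x ≤ n) :
    0 ≤ pyNorm n x ∧ pyNorm n x ≤ n := by
  unfold pyNorm
  split_ifs <;> omega

lemma newMask_lt (tid : Int → Option Nat) (v : Int) (m T : Nat)
    (hm : m < 2 ^ T) (htid : ∀ x i, tid x = some i → i < T) :
    newMask tid v m < 2 ^ T := by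
  unfold newMask
  cases h : tid v with
  | none => exact hm
  | some i =>
    have hi : i < T := htid v i h
    have h1 : (1 <<< i) < 2 ^ T := by
      rw [Nat.shiftLeft_eq, one_mul]
      exact Nat.pow_lt_pow_right (by norm_num) hi
    exact Nat.xor_lt_two_pow hm h1

lemma mkTrapIdsAux_lt : ∀ (ts : List Int) (f : Int → Option Nat) (j : Nat),
    (∀ x i, f x = some i → i < j) →
    ∀ x i, mkTrapIdsAux f j ts x = some i → i < j + ts.length := by
  intro ts
  induction ts with
  | nil => intro f j hf x i h; exact Nat.lt_of_lt_of_le (hf x i h) (by omega)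
  | cons t ts ih =>
    intro f j hf x i h
    have := ih _ (j + 1) (by
      intro x i hx
      by_cases hxt : x = t
      · simp [hxt] at hx; omega
      · simp [hxt] at hx; have := hf x i hx; omega) x i h
    exact Nat.lt_of_lt_of_le this (by simp; omega)

lemma mkTrapIds_lt (traps : List Int) : ∀ x i, mkTrapIds traps x = some i → i < traps.length := by
  intro x i h
  simpa using mkTrapIdsAux_lt traps (fun _ => none) 0 (by simp) x i h

lemma aAdj_mem_aux : ∀ (rs : List (List Int)) (f : Int → List (Int × Int × Bool))
    (u : Int) (e : Int × Int × Bool), e ∈ (rs.foldl adjStep f) u →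
    e ∈ f u ∨ ∃ r ∈ rs, ∃ a b w, r = [a, b, w] ∧
      ((u = a ∧ e = (b, w, false)) ∨ (u = b ∧ e = (a, w, true))) := by
  intro rs
  induction rs with
  | nil => intro f u e h; exact Or.inl h
  | cons r rs ih =>
    intro f u e h
    rcases ih (adjStep f r) u e h with h1 | ⟨r', hr', rest⟩
    · rcases r with _ | ⟨a, _ | ⟨b, _ | ⟨w, _ | ⟨y, ys⟩⟩⟩⟩ <;>
        simp only [adjStep] at h1
      · exact Or.inl h1
      · exact Or.inl h1
      · exact Or.inl h1
      · -- r = [a, b, w]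
        by_cases hub : u = b
        · rw [if_pos hub] at h1
          rcases List.mem_append.1 h1 with h2 | h2
          · by_cases hua : u = a
            · rw [if_pos hua] at h2
              rcases List.mem_append.1 h2 with h3 | h3
              · exact Or.inl h3
              · exact Or.inr ⟨[a, b, w], by simp, a, b, w, rfl, Or.inl ⟨hua, by simpa using h3⟩⟩
            · rw [if_neg hua] at h2; exact Or.inl h2
          · exact Or.inr ⟨[a, b, w], by simp, a, b, w, rfl, Or.inr ⟨hub, by simpa using h2⟩⟩
        · rw [if_neg hub] at h1
          by_cases hua : u = a
          · rw [if_pos hua] at h1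
            rcases List.mem_append.1 h1 with h3 | h3
            · exact Or.inl h3
            · exact Or.inr ⟨[a, b, w], by simp, a, b, w, rfl, Or.inl ⟨hua, by simpa using h3⟩⟩
          · rw [if_neg hua] at h1; exact Or.inl h1
      · exact Or.inl h1
    · exact Or.inr ⟨r', by simp [hr'], rest⟩

lemma popMin_none : ∀ {q : List (Int × Int × Nat)}, popMin q = none → q = [] := by
  intro q h
  cases q with
  | nil => rfl
  | cons x xs =>
    exfalso
    simp only [popMin] at h
    split at h
    · simp at h
    · split at h <;> simp at h

lemma popMin_perm : ∀ {q : List (Int × Int × Nat)} {e rest},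
    popMin q = some (e, rest) → q.Perm (e :: rest) := by
  intro q
  induction q with
  | nil => intro e rest h; simp [popMin] at h
  | cons x xs ih =>
    intro e rest h
    simp only [popMin] at h
    split at h
    · next hnone =>
      have := popMin_none hnone
      subst this
      simp at h
      obtain ⟨rfl, rfl⟩ := h
      exact List.Perm.refl _
    · next m rest' hsome =>
      have hperm := ih hsome
      split at h <;> simp at h
      · obtain ⟨rfl, rfl⟩ := h
        exact List.Perm.refl _
      · obtain ⟨rfl, rfl⟩ := h
        exact (hperm.cons x).trans (List.Perm.swap m x rest')

-- one full pass of A's inner relaxation loop preserves all invariants, relaxes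
-- every edge of the popped state, keeps its own distance, and does not raise the
-- termination potential (queue length + table sum over the key set K)
lemma aRelax_good (adj : Int → List (Int × Int × Bool)) (tid : Int → Option Nat)
    (n start : Int) (nodes : List Int) (T : Nat) (K : Finset (Int × Nat))
    (hctx : Ctx n start adj tid nodes T)
    (hK : K = ((start :: nodes).map (pyNorm n)).toFinset ×ˢ Finset.range (2 ^ T))
    (u0 : Int) (m0 : Nat) (p : Int) (hu0 : u0 = start ∨ u0 ∈ nodes)
    (hm0 : m0 < 2 ^ T) (hp : 0 ≤ p)
    (hder : Deriv adj tid start u0 m0 p) :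
    ∀ (L : List (Int × Int × Bool)) (d : Int → Nat → Int) (q : List (Int × Int × Nat)),
      (∀ e ∈ L, e ∈ adj u0) → d (pyNorm n u0) m0 = p →
      TInv n adj tid start nodes d →
      QAInv n adj tid start nodes T d q →
      StA n adj tid d q u0 m0 L →
      TInv n adj tid start nodes (aRelax tid n p m0 (isTrapped tid u0 m0) L (d, q)).1 ∧
      QAInv n adj tid start nodes T (aRelax tid n p m0 (isTrapped tid u0 m0) L (d, q)).1
        (aRelax tid n p m0 (isTrapped tid u0 m0) L (d, q)).2 ∧
      StA n adj tid (aRelax tid n p m0 (isTrapped tid u0 m0) L (d, q)).1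
        (aRelax tid n p m0 (isTrapped tid u0 m0) L (d, q)).2 u0 m0 [] ∧
      (aRelax tid n p m0 (isTrapped tid u0 m0) L (d, q)).1 (pyNorm n u0) m0 = p ∧
      (aRelax tid n p m0 (isTrapped tid u0 m0) L (d, q)).2.length +
          ∑ k ∈ K, ((aRelax tid n p m0 (isTrapped tid u0 m0) L (d, q)).1 k.1 k.2).toNat ≤
        q.length + ∑ k ∈ K, (d k.1 k.2).toNat := by
  obtain ⟨hn, hsl, hsr, hnodes, hadj, htid, hinj⟩ := hctx
  intro L
  induction L with
  | nil =>
    intro d q hL hdm hT hQ hSt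
    refine ⟨hT, hQ, ?_, hdm, le_refl _⟩
    intro u m v w rev hmem heok
    rcases hSt u m v w rev hmem heok with h | h | ⟨_, _, h⟩
    · exact Or.inl h
    · exact Or.inr (Or.inl h)
    · simp at h
  | cons nb L ih =>
    intro d q hL hdm hT hQ hSt
    obtain ⟨v, w, rev⟩ := nb
    obtain ⟨hvn, hu0n, hw⟩ := hadj u0 v w rev (hL _ (by simp))
    have hnmlt : newMask tid v m0 < 2 ^ T := newMask_lt tid v m0 T hm0 htid
    have hunfold : ∀ s, aRelax tid n p m0 (isTrapped tid u0 m0) ((v, w, rev) :: L) s =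
        aRelax tid n p m0 (isTrapped tid u0 m0) L
          (aStep tid n p m0 (isTrapped tid u0 m0) s (v, w, rev)) := fun _ => rfl
    rw [hunfold]
    by_cases hc1 : (((isTrapped tid u0 m0 && isTrapped tid v m0) ||
        (!(isTrapped tid u0 m0) && !(isTrapped tid v m0))) == rev) = true
    · -- parity filter skips this edge
      have hstep : aStep tid n p m0 (isTrapped tid u0 m0) (d, q) (v, w, rev) = (d, q) := by
        simp [aStep, hc1]
      rw [hstep]
      refine ih d q (fun e he => hL e (by simp [he])) hdm hT hQ ?_
      intro u m v' w' rev' hmem heok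
      rcases hSt u m v' w' rev' hmem heok with h | h | ⟨h1, h2, h3⟩
      · exact Or.inl h
      · exact Or.inr (Or.inl h)
      · rcases List.mem_cons.1 h3 with h3 | h3
        · exfalso
          subst h1; subst h2
          rw [Prod.mk.injEq, Prod.mk.injEq] at h3
          obtain ⟨rfl, rfl, rfl⟩ := h3
          rw [sameBool] at hc1
          rw [heok] at hc1
          exact Bool.false_ne_true hc1
        · exact Or.inr (Or.inr ⟨h1, h2, h3⟩)
    · have hc1' : ((isTrapped tid u0 m0 == isTrapped tid v m0) == rev) = false := by
        rw [Bool.eq_false_iff]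
        intro hcon
        apply hc1
        rw [sameBool]
        exact hcon
      by_cases hc2 : p + w < d (pyNorm n v) (newMask tid v m0)
      · -- this edge improves the table: update and push
        have hstep : aStep tid n p m0 (isTrapped tid u0 m0) (d, q) (v, w, rev) =
            (updD d (pyNorm n v) (newMask tid v m0) (p + w),
             q ++ [(p + w, v, newMask tid v m0)]) := by
          simp [aStep, hc1, hc2]
        rw [hstep]
        have hkey : ¬(pyNorm n u0 = pyNorm n v ∧ m0 = newMask tid v m0) := by
          rintro ⟨h1, h2⟩
          have huv : u0 = v := hinj u0
            (by
              rcases hu0 with h | h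
              · rw [h]; exact List.mem_cons_self ..
              · exact List.mem_cons_of_mem _ h)
            v (by simp [hvn]) h1
          rw [← h2, ← huv, hdm] at hc2
          omega
        have hndle : p + w ≤ 1000000000 := le_of_lt (lt_of_lt_of_le hc2 (hT.1 _ _).2)
        have hDnd : Deriv adj tid start v (newMask tid v m0) (p + w) :=
          Deriv.step hder (hL _ (by simp)) hc1'
        have hd'le : ∀ x m, updD d (pyNorm n v) (newMask tid v m0) (p + w) x m ≤ d x m := by
          intro x m
          simp only [updD]
          split_ifs with h
          · obtain ⟨rfl, rfl⟩ := h; omega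
          · exact le_refl _
        have hd'key : updD d (pyNorm n v) (newMask tid v m0) (p + w)
            (pyNorm n v) (newMask tid v m0) = p + w := by
          simp [updD]
        have hd'u0 : updD d (pyNorm n v) (newMask tid v m0) (p + w) (pyNorm n u0) m0 = p := by
          simp only [updD]
          rw [if_neg hkey]
          exact hdm
        have hT' : TInv n adj tid start nodes (updD d (pyNorm n v) (newMask tid v m0) (p + w)) := by
          refine ⟨?_, ?_, ?_⟩
          · intro x m
            simp only [updD]
            split_ifs with h
            · constructor <;> omega
            · exact hT.1 x m
          · have := hT.2.1
            simp only [updD]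
            split_ifs with h
            · obtain ⟨h1, h2⟩ := h
              rw [h1, h2] at this
              omega
            · exact this
          · intro x m
            simp only [updD]
            split_ifs with h
            · obtain ⟨rfl, rfl⟩ := h
              exact Or.inr ⟨v, Or.inr hvn, rfl, hDnd⟩
            · exact hT.2.2 x m
        have hQ' : QAInv n adj tid start nodes T (updD d (pyNorm n v) (newMask tid v m0) (p + w))
            (q ++ [(p + w, v, newMask tid v m0)]) := by
          intro e he
          rcases List.mem_append.1 he with he | he
          · obtain ⟨ha, hb, hc, hd, he'⟩ := hQ e he
            exact ⟨ha, hb, hc, le_trans (hd'le _ _) hd, he'⟩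
          · simp only [List.mem_singleton] at he
            subst he
            exact ⟨Or.inr hvn, hnmlt, by omega, by rw [hd'key], hDnd⟩
        have hSt' : StA n adj tid (updD d (pyNorm n v) (newMask tid v m0) (p + w))
            (q ++ [(p + w, v, newMask tid v m0)]) u0 m0 L := by
          intro u m v' w' rev' hmem heok
          have hun : u ∈ nodes := (hadj u v' w' rev' hmem).2.1
          rcases hSt u m v' w' rev' hmem heok with h | h | ⟨h1, h2, h3⟩
          · by_cases hsrc : pyNorm n u = pyNorm n v ∧ m = newMask tid v m0
            · obtain ⟨h1, rfl⟩ := hsrc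
              have huv : u = v := hinj u (by simp [hun]) v (by simp [hvn]) h1
              subst huv
              refine Or.inr (Or.inl ?_)
              rw [h1, hd'key]
              exact List.mem_append.2 (Or.inr (by simp))
            · refine Or.inl ?_
              have h1 : updD d (pyNorm n v) (newMask tid v m0) (p + w) (pyNorm n u) m = d (pyNorm n u) m := by
                simp only [updD]
                rw [if_neg hsrc]
              rw [h1]
              exact le_trans (hd'le _ _) h
          · by_cases hsrc : pyNorm n u = pyNorm n v ∧ m = newMask tid v m0
            · obtain ⟨h1, rfl⟩ := hsrc
              have huv : u = v := hinj u (by simp [hun]) v (by simp [hvn]) h1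
              subst huv
              refine Or.inr (Or.inl ?_)
              rw [h1, hd'key]
              exact List.mem_append.2 (Or.inr (by simp))
            · refine Or.inr (Or.inl ?_)
              have h1 : updD d (pyNorm n v) (newMask tid v m0) (p + w) (pyNorm n u) m = d (pyNorm n u) m := by
                simp only [updD]
                rw [if_neg hsrc]
              rw [h1]
              exact List.mem_append.2 (Or.inl h)
          · rcases List.mem_cons.1 h3 with h3 | h3
            · subst h1; subst h2
              rw [Prod.mk.injEq, Prod.mk.injEq] at h3
              obtain ⟨rfl, rfl, rfl⟩ := h3
              refine Or.inl ?_
              rw [hd'key, hd'u0]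
            · exact Or.inr (Or.inr ⟨h1, h2, h3⟩)
        have hrec := ih (updD d (pyNorm n v) (newMask tid v m0) (p + w))
          (q ++ [(p + w, v, newMask tid v m0)])
          (fun e he => hL e (by simp [he])) hd'u0 hT' hQ' hSt'
        refine ⟨hrec.1, hrec.2.1, hrec.2.2.1, hrec.2.2.2.1, le_trans hrec.2.2.2.2 ?_⟩
        have hk0 : (pyNorm n v, newMask tid v m0) ∈ K := by
          rw [hK]
          refine Finset.mem_product.2 ⟨List.mem_toFinset.2 ?_, Finset.mem_range.2 hnmlt⟩
          exact List.mem_map.2 ⟨v, by simp [hvn], rfl⟩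
        have hlt : ∑ k ∈ K, (updD d (pyNorm n v) (newMask tid v m0) (p + w) k.1 k.2).toNat <
            ∑ k ∈ K, (d k.1 k.2).toNat := by
          refine Finset.sum_lt_sum (fun k _ => Int.toNat_le_toNat (hd'le k.1 k.2))
            ⟨(pyNorm n v, newMask tid v m0), hk0, ?_⟩
          show (updD d (pyNorm n v) (newMask tid v m0) (p + w) (pyNorm n v) (newMask tid v m0)).toNat <
            (d (pyNorm n v) (newMask tid v m0)).toNat
          rw [hd'key]
          omega
        simp only [List.length_append, List.length_singleton]
        omega
      · -- no improvement: the edge is already satisfied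
        have hstep : aStep tid n p m0 (isTrapped tid u0 m0) (d, q) (v, w, rev) = (d, q) := by
          simp [aStep, hc1, hc2]
        rw [hstep]
        refine ih d q (fun e he => hL e (by simp [he])) hdm hT hQ ?_
        intro u m v' w' rev' hmem heok
        rcases hSt u m v' w' rev' hmem heok with h | h | ⟨h1, h2, h3⟩
        · exact Or.inl h
        · exact Or.inr (Or.inl h)
        · rcases List.mem_cons.1 h3 with h3 | h3
          · subst h1; subst h2
            rw [Prod.mk.injEq, Prod.mk.injEq] at h3
            obtain ⟨rfl, rfl, rfl⟩ := h3
            refine Or.inl ?_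
            rw [hdm]
            omega
          · exact Or.inr (Or.inr ⟨h1, h2, h3⟩)

-- with the excuse list empty the excused-source parameters are irrelevant
lemma StA_nil (n : Int) (adj : Int → List (Int × Int × Bool)) (tid : Int → Option Nat)
    (d : Int → Nat → Int) (q : List (Int × Int × Nat)) (a a' : Int) (b b' : Nat)
    (h : StA n adj tid d q a b []) : StA n adj tid d q a' b' [] := by
  intro u m v w rev hmem heok
  rcases h u m v w rev hmem heok with h1 | h1 | ⟨_, _, h1⟩
  · exact Or.inl h1
  · exact Or.inr (Or.inl h1)
  · simp at h1

-- A's whole worklist loop: enough fuel empties the queue, leaving an invariant,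
-- fully stable table
lemma aLoop_good (adj : Int → List (Int × Int × Bool)) (tid : Int → Option Nat)
    (n start : Int) (nodes : List Int) (T : Nat) (K : Finset (Int × Nat))
    (hctx : Ctx n start adj tid nodes T)
    (hK : K = ((start :: nodes).map (pyNorm n)).toFinset ×ˢ Finset.range (2 ^ T)) :
    ∀ (fuel : Nat) (d : Int → Nat → Int) (q : List (Int × Int × Nat)),
      TInv n adj tid start nodes d →
      QAInv n adj tid start nodes T d q →
      StA n adj tid d q start 0 [] →
      q.length + ∑ k ∈ K, (d k.1 k.2).toNat < fuel →
      TInv n adj tid start nodes (aLoop adj tid n fuel d q) ∧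
      StA n adj tid (aLoop adj tid n fuel d q) [] start 0 [] := by
  intro fuel
  induction fuel with
  | zero => intro d q _ _ _ hf; omega
  | succ fuel ih =>
    intro d q hT hQ hSt hf
    cases hpop : popMin q with
    | none =>
      have hq := popMin_none hpop
      subst hq
      simp only [aLoop, hpop]
      exact ⟨hT, hSt⟩
    | some er =>
      obtain ⟨e, rest⟩ := er
      have hperm := popMin_perm hpop
      have he : e ∈ q := hperm.mem_iff.2 (by simp)
      obtain ⟨hu, hmlt, hp0, hdle, hDer⟩ := hQ e he
      have hlen : q.length = rest.length + 1 := by rw [hperm.length_eq]; simp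
      have hQrest : QAInv n adj tid start nodes T d rest :=
        fun e' he' => hQ e' (hperm.mem_iff.2 (List.mem_cons_of_mem _ he'))
      simp only [aLoop, hpop]
      by_cases hlt : d (pyNorm n e.2.1) e.2.2 < e.1
      · rw [if_pos hlt]
        refine ih d rest hT hQrest ?_ (by omega)
        intro u m v w rev hmem heok
        rcases hSt u m v w rev hmem heok with h | h | ⟨_, _, h⟩
        · exact Or.inl h
        · rcases List.mem_cons.1 (hperm.mem_iff.1 h) with h1 | h1
          · exfalso
            have h2 : d (pyNorm n u) m = e.1 ∧ u = e.2.1 ∧ m = e.2.2 := by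
              obtain ⟨a, b, c⟩ := e
              rw [Prod.mk.injEq, Prod.mk.injEq] at h1
              exact ⟨h1.1, h1.2.1, h1.2.2⟩
            obtain ⟨h2, rfl, rfl⟩ := h2
            omega
          · exact Or.inr (Or.inl h1)
        · simp at h
      · rw [if_neg hlt]
        have hdm : d (pyNorm n e.2.1) e.2.2 = e.1 := le_antisymm hdle (not_lt.1 hlt)
        have hSt' : StA n adj tid d rest e.2.1 e.2.2 (adj e.2.1) := by
          intro u m v w rev hmem heok
          rcases hSt u m v w rev hmem heok with h | h | ⟨_, _, h⟩
          · exact Or.inl h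
          · rcases List.mem_cons.1 (hperm.mem_iff.1 h) with h1 | h1
            · have h2 : d (pyNorm n u) m = e.1 ∧ u = e.2.1 ∧ m = e.2.2 := by
                obtain ⟨a, b, c⟩ := e
                rw [Prod.mk.injEq, Prod.mk.injEq] at h1
                exact ⟨h1.1, h1.2.1, h1.2.2⟩
              obtain ⟨h2, rfl, rfl⟩ := h2
              exact Or.inr (Or.inr ⟨rfl, rfl, hmem⟩)
            · exact Or.inr (Or.inl h1)
          · simp at h
        have hrel := aRelax_good adj tid n start nodes T K hctx hK e.2.1 e.2.2 e.1
          hu hmlt hp0 hDer (adj e.2.1) d rest (fun _ he' => he') hdm hT hQrest hSt'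
        refine ih _ _ hrel.1 hrel.2.1 (StA_nil _ _ _ _ _ _ _ _ _ hrel.2.2.1) ?_
        have := hrel.2.2.2.2
        omega

lemma StB_nil (n : Int) (adj : Int → List (Int × Int × Bool)) (tid : Int → Option Nat)
    (d : Int → Nat → Int) (q : List (Int × Nat)) (a a' : Int) (b b' : Nat)
    (h : StB n adj tid d q a b []) : StB n adj tid d q a' b' [] := by
  intro u m v w rev hmem heok
  rcases h u m v w rev hmem heok with h1 | h1 | ⟨_, _, h1⟩
  · exact Or.inl h1
  · exact Or.inr (Or.inl h1)
  · simp at h1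

-- one full pass of B's inner relaxation loop: invariants (including the
-- in-queue marker set mirroring the FIFO queue) are preserved and the
-- termination potential does not increase
lemma bRelax_good (adj : Int → List (Int × Int × Bool)) (tid : Int → Option Nat)
    (n start : Int) (nodes : List Int) (T : Nat) (K : Finset (Int × Nat))
    (hctx : Ctx n start adj tid nodes T)
    (hK : K = ((start :: nodes).map (pyNorm n)).toFinset ×ˢ Finset.range (2 ^ T))
    (u0 : Int) (m0 : Nat) (p : Int) (hu0 : u0 = start ∨ u0 ∈ nodes)
    (hm0 : m0 < 2 ^ T) (hp : 0 ≤ p)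
    (hder : p = 1000000000 ∨ Deriv adj tid start u0 m0 p) :
    ∀ (L : List (Int × Int × Bool)) (d : Int → Nat → Int) (q : List (Int × Nat))
      (inq : PySem.Set (Int × Nat)),
      (∀ e ∈ L, e ∈ adj u0) → d (pyNorm n u0) m0 = p →
      TInv n adj tid start nodes d →
      QBInv start nodes T q → q.Nodup → (∀ x, x ∈ inq ↔ x ∈ q) →
      StB n adj tid d q u0 m0 L →
      TInv n adj tid start nodes (bRelax tid n p m0 (isTrapped tid u0 m0) L (d, q, inq)).1 ∧
      QBInv start nodes T (bRelax tid n p m0 (isTrapped tid u0 m0) L (d, q, inq)).2.1 ∧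
      (bRelax tid n p m0 (isTrapped tid u0 m0) L (d, q, inq)).2.1.Nodup ∧
      (∀ x, x ∈ (bRelax tid n p m0 (isTrapped tid u0 m0) L (d, q, inq)).2.2 ↔
        x ∈ (bRelax tid n p m0 (isTrapped tid u0 m0) L (d, q, inq)).2.1) ∧
      StB n adj tid (bRelax tid n p m0 (isTrapped tid u0 m0) L (d, q, inq)).1
        (bRelax tid n p m0 (isTrapped tid u0 m0) L (d, q, inq)).2.1 u0 m0 [] ∧
      (bRelax tid n p m0 (isTrapped tid u0 m0) L (d, q, inq)).1 (pyNorm n u0) m0 = p ∧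
      (bRelax tid n p m0 (isTrapped tid u0 m0) L (d, q, inq)).2.1.length +
          ∑ k ∈ K, ((bRelax tid n p m0 (isTrapped tid u0 m0) L (d, q, inq)).1 k.1 k.2).toNat ≤
        q.length + ∑ k ∈ K, (d k.1 k.2).toNat := by
  obtain ⟨hn, hsl, hsr, hnodes, hadj, htid, hinj⟩ := hctx
  intro L
  induction L with
  | nil =>
    intro d q inq hL hdm hT hQ hnd hiq hSt
    refine ⟨hT, hQ, hnd, hiq, ?_, hdm, le_refl _⟩
    intro u m v w rev hmem heok
    rcases hSt u m v w rev hmem heok with h | h | ⟨_, _, h⟩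
    · exact Or.inl h
    · exact Or.inr (Or.inl h)
    · simp at h
  | cons nb L ih =>
    intro d q inq hL hdm hT hQ hnd hiq hSt
    obtain ⟨v, w, rev⟩ := nb
    obtain ⟨hvn, hu0n, hw⟩ := hadj u0 v w rev (hL _ (by simp))
    have hnmlt : newMask tid v m0 < 2 ^ T := newMask_lt tid v m0 T hm0 htid
    have hunfold : ∀ s, bRelax tid n p m0 (isTrapped tid u0 m0) ((v, w, rev) :: L) s =
        bRelax tid n p m0 (isTrapped tid u0 m0) L
          (bStep tid n p m0 (isTrapped tid u0 m0) s (v, w, rev)) := fun _ => rfl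
    rw [hunfold]
    by_cases hc1 : ((isTrapped tid u0 m0 == isTrapped tid v m0) == rev) = true
    · -- parity filter skips this edge
      have hstep : bStep tid n p m0 (isTrapped tid u0 m0) (d, q, inq) (v, w, rev) =
          (d, q, inq) := by
        simp [bStep, hc1]
      rw [hstep]
      refine ih d q inq (fun e he => hL e (by simp [he])) hdm hT hQ hnd hiq ?_
      intro u m v' w' rev' hmem heok
      rcases hSt u m v' w' rev' hmem heok with h | h | ⟨h1, h2, h3⟩
      · exact Or.inl h
      · exact Or.inr (Or.inl h)
      · rcases List.mem_cons.1 h3 with h3 | h3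
        · exfalso
          subst h1; subst h2
          rw [Prod.mk.injEq, Prod.mk.injEq] at h3
          obtain ⟨rfl, rfl, rfl⟩ := h3
          rw [heok] at hc1
          exact Bool.false_ne_true hc1
        · exact Or.inr (Or.inr ⟨h1, h2, h3⟩)
    · have hc1' : ((isTrapped tid u0 m0 == isTrapped tid v m0) == rev) = false :=
        Bool.eq_false_iff.2 hc1
      by_cases hc2 : p + w < d (pyNorm n v) (newMask tid v m0)
      · -- this edge improves the table
        have hDer : Deriv adj tid start u0 m0 p := by
          rcases hder with h | h
          · exfalso
            have := (hT.1 (pyNorm n v) (newMask tid v m0)).2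
            omega
          · exact h
        have hkey : ¬(pyNorm n u0 = pyNorm n v ∧ m0 = newMask tid v m0) := by
          rintro ⟨h1, h2⟩
          have huv : u0 = v := hinj u0
            (by
              rcases hu0 with h | h
              · rw [h]; exact List.mem_cons_self ..
              · exact List.mem_cons_of_mem _ h)
            v (by simp [hvn]) h1
          rw [← h2, ← huv, hdm] at hc2
          omega
        have hndle : p + w ≤ 1000000000 := le_of_lt (lt_of_lt_of_le hc2 (hT.1 _ _).2)
        have hDnd : Deriv adj tid start v (newMask tid v m0) (p + w) :=
          Deriv.step hDer (hL _ (by simp)) hc1'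
        have hd'le : ∀ x m, updD d (pyNorm n v) (newMask tid v m0) (p + w) x m ≤ d x m := by
          intro x m
          simp only [updD]
          split_ifs with h
          · obtain ⟨rfl, rfl⟩ := h; omega
          · exact le_refl _
        have hd'key : updD d (pyNorm n v) (newMask tid v m0) (p + w)
            (pyNorm n v) (newMask tid v m0) = p + w := by
          simp [updD]
        have hd'u0 : updD d (pyNorm n v) (newMask tid v m0) (p + w) (pyNorm n u0) m0 = p := by
          simp only [updD]
          rw [if_neg hkey]
          exact hdm
        have hT' : TInv n adj tid start nodes (updD d (pyNorm n v) (newMask tid v m0) (p + w)) := by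
          refine ⟨?_, ?_, ?_⟩
          · intro x m
            simp only [updD]
            split_ifs with h
            · constructor <;> omega
            · exact hT.1 x m
          · have := hT.2.1
            simp only [updD]
            split_ifs with h
            · obtain ⟨h1, h2⟩ := h
              rw [h1, h2] at this
              omega
            · exact this
          · intro x m
            simp only [updD]
            split_ifs with h
            · obtain ⟨rfl, rfl⟩ := h
              exact Or.inr ⟨v, Or.inr hvn, rfl, hDnd⟩
            · exact hT.2.2 x m
        have hsum : ∑ k ∈ K, (updD d (pyNorm n v) (newMask tid v m0) (p + w) k.1 k.2).toNat + 1 ≤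
            ∑ k ∈ K, (d k.1 k.2).toNat := by
          have hk0 : (pyNorm n v, newMask tid v m0) ∈ K := by
            rw [hK]
            refine Finset.mem_product.2 ⟨List.mem_toFinset.2 ?_, Finset.mem_range.2 hnmlt⟩
            exact List.mem_map.2 ⟨v, by simp [hvn], rfl⟩
          have hlt : ∑ k ∈ K, (updD d (pyNorm n v) (newMask tid v m0) (p + w) k.1 k.2).toNat <
              ∑ k ∈ K, (d k.1 k.2).toNat := by
            refine Finset.sum_lt_sum (fun k _ => Int.toNat_le_toNat (hd'le k.1 k.2))
              ⟨(pyNorm n v, newMask tid v m0), hk0, ?_⟩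
            show (updD d (pyNorm n v) (newMask tid v m0) (p + w)
              (pyNorm n v) (newMask tid v m0)).toNat < (d (pyNorm n v) (newMask tid v m0)).toNat
            rw [hd'key]
            omega
          omega
        have hStup : ∀ (q' : List (Int × Nat)),
            (∀ u m, (u, m) ∈ q → (u, m) ∈ q') →
            ((v, newMask tid v m0) : Int × Nat) ∈ q' →
            StB n adj tid d q u0 m0 ((v, w, rev) :: L) →
            StB n adj tid (updD d (pyNorm n v) (newMask tid v m0) (p + w)) q' u0 m0 L := by
          intro q' hsub hnew hSt0 u m v' w' rev' hmem heok
          have hun : u ∈ nodes := (hadj u v' w' rev' hmem).2.1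
          rcases hSt0 u m v' w' rev' hmem heok with h | h | ⟨h1, h2, h3⟩
          · by_cases hsrc : pyNorm n u = pyNorm n v ∧ m = newMask tid v m0
            · obtain ⟨h1, rfl⟩ := hsrc
              have huv : u = v := hinj u (by simp [hun]) v (by simp [hvn]) h1
              subst huv
              exact Or.inr (Or.inl hnew)
            · refine Or.inl ?_
              have h1 : updD d (pyNorm n v) (newMask tid v m0) (p + w) (pyNorm n u) m =
                  d (pyNorm n u) m := by
                simp only [updD]
                rw [if_neg hsrc]
              rw [h1]
              exact le_trans (hd'le _ _) h
          · exact Or.inr (Or.inl (hsub u m h))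
          · rcases List.mem_cons.1 h3 with h3 | h3
            · subst h1; subst h2
              rw [Prod.mk.injEq, Prod.mk.injEq] at h3
              obtain ⟨rfl, rfl, rfl⟩ := h3
              refine Or.inl ?_
              rw [hd'key, hd'u0]
            · exact Or.inr (Or.inr ⟨h1, h2, h3⟩)
        by_cases hin : ((v, newMask tid v m0) : Int × Nat) ∈ inq
        · -- already marked in-queue: update the table only
          have hstep : bStep tid n p m0 (isTrapped tid u0 m0) (d, q, inq) (v, w, rev) =
              (updD d (pyNorm n v) (newMask tid v m0) (p + w), q, inq) := by
            simp [bStep, hc1, hc2, hin]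
          rw [hstep]
          have hrec := ih (updD d (pyNorm n v) (newMask tid v m0) (p + w)) q inq
            (fun e he => hL e (by simp [he])) hd'u0 hT' hQ hnd hiq
            (hStup q (fun _ _ h => h) ((hiq _).1 hin) hSt)
          refine ⟨hrec.1, hrec.2.1, hrec.2.2.1, hrec.2.2.2.1, hrec.2.2.2.2.1,
            hrec.2.2.2.2.2.1, le_trans hrec.2.2.2.2.2.2 (by omega)⟩
        · -- not in queue: update, append to the FIFO and mark
          have hstep : bStep tid n p m0 (isTrapped tid u0 m0) (d, q, inq) (v, w, rev) =
              (updD d (pyNorm n v) (newMask tid v m0) (p + w), q ++ [(v, newMask tid v m0)],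
               PySem.Set.add inq (v, newMask tid v m0)) := by
            simp [bStep, hc1, hc2, hin]
          rw [hstep]
          have hqnot : ((v, newMask tid v m0) : Int × Nat) ∉ q := fun h => hin ((hiq _).2 h)
          have hnd' : (q ++ [((v : Int), newMask tid v m0)]).Nodup := by
            rw [List.nodup_append]
            refine ⟨hnd, List.nodup_singleton _, ?_⟩
            intro a ha b hb
            rw [List.mem_singleton] at hb
            subst hb
            intro hab
            rw [hab] at ha
            exact hqnot ha
          have hiq' : ∀ x, x ∈ PySem.Set.add inq ((v, newMask tid v m0) : Int × Nat) ↔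
              x ∈ q ++ [((v : Int), newMask tid v m0)] := by
            intro x
            rw [PySem.Set.mem_add, List.mem_append, List.mem_singleton, hiq]
          have hQ' : QBInv start nodes T (q ++ [((v : Int), newMask tid v m0)]) := by
            intro e he
            rcases List.mem_append.1 he with he | he
            · exact hQ e he
            · simp only [List.mem_singleton] at he
              subst he
              exact ⟨Or.inr hvn, hnmlt⟩
          have hrec := ih (updD d (pyNorm n v) (newMask tid v m0) (p + w))
            (q ++ [((v : Int), newMask tid v m0)]) (PySem.Set.add inq (v, newMask tid v m0))
            (fun e he => hL e (by simp [he])) hd'u0 hT' hQ' hnd' hiq'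
            (hStup (q ++ [(v, newMask tid v m0)])
              (fun _ _ h => List.mem_append.2 (Or.inl h))
              (List.mem_append.2 (Or.inr (by simp))) hSt)
          refine ⟨hrec.1, hrec.2.1, hrec.2.2.1, hrec.2.2.2.1, hrec.2.2.2.2.1,
            hrec.2.2.2.2.2.1, le_trans hrec.2.2.2.2.2.2 ?_⟩
          simp only [List.length_append, List.length_singleton]
          omega
      · -- no improvement: the edge is already satisfied
        have hstep : bStep tid n p m0 (isTrapped tid u0 m0) (d, q, inq) (v, w, rev) =
            (d, q, inq) := by
          simp [bStep, hc1, hc2]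
        rw [hstep]
        refine ih d q inq (fun e he => hL e (by simp [he])) hdm hT hQ hnd hiq ?_
        intro u m v' w' rev' hmem heok
        rcases hSt u m v' w' rev' hmem heok with h | h | ⟨h1, h2, h3⟩
        · exact Or.inl h
        · exact Or.inr (Or.inl h)
        · rcases List.mem_cons.1 h3 with h3 | h3
          · subst h1; subst h2
            rw [Prod.mk.injEq, Prod.mk.injEq] at h3
            obtain ⟨rfl, rfl, rfl⟩ := h3
            refine Or.inl ?_
            rw [hdm]
            omega
          · exact Or.inr (Or.inr ⟨h1, h2, h3⟩)

-- B's whole SPFA loop: enough fuel empties the FIFO, leaving an invariant,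
-- fully stable table
lemma bLoop_good (adj : Int → List (Int × Int × Bool)) (tid : Int → Option Nat)
    (n start : Int) (nodes : List Int) (T : Nat) (K : Finset (Int × Nat))
    (hctx : Ctx n start adj tid nodes T)
    (hK : K = ((start :: nodes).map (pyNorm n)).toFinset ×ˢ Finset.range (2 ^ T)) :
    ∀ (fuel : Nat) (d : Int → Nat → Int) (q : List (Int × Nat)) (inq : PySem.Set (Int × Nat)),
      TInv n adj tid start nodes d →
      QBInv start nodes T q → q.Nodup → (∀ x, x ∈ inq ↔ x ∈ q) →
      StB n adj tid d q start 0 [] →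
      q.length + ∑ k ∈ K, (d k.1 k.2).toNat < fuel →
      TInv n adj tid start nodes (bLoop adj tid n fuel d q inq) ∧
      StB n adj tid (bLoop adj tid n fuel d q inq) [] start 0 [] := by
  intro fuel
  induction fuel with
  | zero => intro d q inq _ _ _ _ _ hf; omega
  | succ fuel ih =>
    intro d q inq hT hQ hnd hiq hSt hf
    cases q with
    | nil =>
      simp only [bLoop]
      exact ⟨hT, hSt⟩
    | cons e rest =>
      obtain ⟨hu, hmlt⟩ := hQ e (by simp)
      have hiq' : ∀ x, x ∈ PySem.Set.discard inq e ↔ x ∈ rest := by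
        intro x
        rw [PySem.Set.mem_discard, hiq]
        constructor
        · rintro ⟨hx, hne⟩
          rcases List.mem_cons.1 hx with h | h
          · exact absurd h hne
          · exact h
        · intro hx
          refine ⟨List.mem_cons_of_mem _ hx, ?_⟩
          rintro rfl
          exact (List.nodup_cons.1 hnd).1 hx
      have hSt' : StB n adj tid d rest e.1 e.2 (adj e.1) := by
        intro u m v w rev hmem heok
        rcases hSt u m v w rev hmem heok with h | h | ⟨_, _, h⟩
        · exact Or.inl h
        · rcases List.mem_cons.1 h with h1 | h1
          · have h2 : u = e.1 ∧ m = e.2 := by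
              obtain ⟨a, b⟩ := e
              rw [Prod.mk.injEq] at h1
              exact ⟨h1.1, h1.2⟩
            obtain ⟨rfl, rfl⟩ := h2
            exact Or.inr (Or.inr ⟨rfl, rfl, hmem⟩)
          · exact Or.inr (Or.inl h1)
        · simp at h
      have hder : d (pyNorm n e.1) e.2 = 1000000000 ∨
          Deriv adj tid start e.1 e.2 (d (pyNorm n e.1) e.2) := by
        rcases hT.2.2 (pyNorm n e.1) e.2 with h | ⟨v', hv'm, hveq, hD⟩
        · exact Or.inl h
        · have hv'e : v' = e.1 := hctx.2.2.2.2.2.2 v'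
            (by
              rcases hv'm with h | h
              · rw [h]; exact List.mem_cons_self ..
              · exact List.mem_cons_of_mem _ h)
            e.1
            (by
              rcases hu with h | h
              · rw [h]; exact List.mem_cons_self ..
              · exact List.mem_cons_of_mem _ h)
            hveq
          rw [hv'e] at hD
          exact Or.inr hD
      simp only [bLoop]
      have hrel := bRelax_good adj tid n start nodes T K hctx hK
        e.1 e.2 (d (pyNorm n e.1) e.2) hu hmlt (hT.1 _ e.2).1 hder
        (adj e.1) d rest (PySem.Set.discard inq e) (fun _ he' => he') rfl hT
        (fun e' he' => hQ e' (List.mem_cons_of_mem _ he')) (List.nodup_cons.1 hnd).2 hiq' hSt'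
      refine ih _ _ _ hrel.1 hrel.2.1 hrel.2.2.1 hrel.2.2.2.1
        (StB_nil _ _ _ _ _ _ _ _ _ hrel.2.2.2.2.1) ?_
      have := hrel.2.2.2.2.2.2
      simp only [List.length_cons] at hf
      omega

-- a fully stable table lower-bounds every derivable relaxation value
lemma stable_le (n : Int) (adj : Int → List (Int × Int × Bool)) (tid : Int → Option Nat)
    (start : Int) (d : Int → Nat → Int)
    (hst : ∀ u m v w rev, (v, w, rev) ∈ adj u →
      ((isTrapped tid u m == isTrapped tid v m) == rev) = false →
      d (pyNorm n v) (newMask tid v m) ≤ d (pyNorm n u) m + w)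
    (h0 : d (pyNorm n start) 0 ≤ 0) :
    ∀ x m c, Deriv adj tid start x m c → d (pyNorm n x) m ≤ c := by
  intro x m c h
  induction h with
  | base => exact h0
  | step hD hmem heok ih => exact le_trans (hst _ _ _ _ _ hmem heok) (by omega)

-- the two final tables agree everywhere: each is stable and each entry of
-- either is INF or derivable, so they bound each other
lemma tables_eq (n : Int) (adj : Int → List (Int × Int × Bool)) (tid : Int → Option Nat)
    (start : Int) (nodes : List Int) (dA dB : Int → Nat → Int)
    (hTA : TInv n adj tid start nodes dA) (hTB : TInv n adj tid start nodes dB)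
    (hSA : StA n adj tid dA [] start 0 []) (hSB : StB n adj tid dB [] start 0 []) :
    ∀ x m, dA x m = dB x m := by
  have hstA : ∀ u m v w rev, (v, w, rev) ∈ adj u →
      ((isTrapped tid u m == isTrapped tid v m) == rev) = false →
      dA (pyNorm n v) (newMask tid v m) ≤ dA (pyNorm n u) m + w := by
    intro u m v w rev hmem heok
    rcases hSA u m v w rev hmem heok with h | h | ⟨_, _, h⟩
    · exact h
    · simp at h
    · simp at h
  have hstB : ∀ u m v w rev, (v, w, rev) ∈ adj u →
      ((isTrapped tid u m == isTrapped tid v m) == rev) = false →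
      dB (pyNorm n v) (newMask tid v m) ≤ dB (pyNorm n u) m + w := by
    intro u m v w rev hmem heok
    rcases hSB u m v w rev hmem heok with h | h | ⟨_, _, h⟩
    · exact h
    · simp at h
    · simp at h
  intro x m
  have h1 : dA x m ≤ dB x m := by
    rcases hTB.2.2 x m with h | ⟨v, hvm, hveq, hD⟩
    · rw [h]; exact (hTA.1 x m).2
    · have := stable_le n adj tid start dA hstA hTA.2.1 v m _ hD
      rw [hveq] at this
      exact this
  have h2 : dB x m ≤ dA x m := by
    rcases hTA.2.2 x m with h | ⟨v, hvm, hveq, hD⟩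
    · rw [h]; exact (hTB.1 x m).2
    · have := stable_le n adj tid start dB hstB hTB.2.1 v m _ hD
      rw [hveq] at this
      exact this
  omega

-- A's final strict-< scan of distance[end] equals B's min() of the same row
lemma final_min_eq (g : Nat → Int) (M : Nat) (hM : 0 < M) (hb : ∀ m, g m ≤ 1000000000) :
    (List.range M).foldl (fun acc m => if g m < acc then g m else acc) 1000000000 =
      (match (List.range M).map (fun m => g m) with
       | [] => (0 : Int)
       | x :: xs => xs.foldl min x) := by
  have hfun : (fun (acc : Int) (m : Nat) => if g m < acc then g m else acc) =
      (fun (acc : Int) (m : Nat) => min acc (g m)) := by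
    funext a m
    simp only [min_def]
    split_ifs <;> omega
  have step1 : (List.range M).foldl (fun acc m => if g m < acc then g m else acc) 1000000000 =
      ((List.range M).map (fun m => g m)).foldl min 1000000000 := by
    rw [List.foldl_map, hfun]
  rw [step1]
  cases hL : (List.range M).map (fun m => g m) with
  | nil =>
    exfalso
    have := congrArg List.length hL
    simp at this
    omega
  | cons x xs =>
    have hx : x ≤ 1000000000 := by
      have hmem : x ∈ (List.range M).map (fun m => g m) := by rw [hL]; simp
      obtain ⟨m, -, rfl⟩ := List.mem_map.1 hmem
      exact hb m
    rw [List.foldl_cons, min_eq_right hx]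

-- an isolated start (no incident road): one pop and the worklists are done
lemma aLoop_iso (adj : Int → List (Int × Int × Bool)) (tid : Int → Option Nat) (n : Int)
    (fuel : Nat) (d : Int → Nat → Int) (s : Int) (hadjs : adj s = [])
    (hd : d (pyNorm n s) 0 = 0) : aLoop adj tid n (fuel + 2) d [(0, s, 0)] = d := by
  simp only [aLoop, popMin]
  rw [hd, hadjs]
  simp [aRelax, popMin]

lemma bLoop_iso (adj : Int → List (Int × Int × Bool)) (tid : Int → Option Nat) (n : Int)
    (fuel : Nat) (d : Int → Nat → Int) (s : Int) (inq : PySem.Set (Int × Nat))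
    (hadjs : adj s = []) : bLoop adj tid n (fuel + 2) d [(s, 0)] inq = d := by
  simp only [bLoop]
  rw [hadjs]
  simp [bRelax]

-- ===== VERDICT (by name: the statement is the Claim_ definition above) =====
theorem solution_spec : Claim_equal_solution := by
  intro n start end_ roads traps hdom hpre
  obtain ⟨hn, hsl, hsr, he1, he2, hlen3, hdisj⟩ := hpre
  unfold Spec_solution
  simp only [solution, solution_alt]
  set d0 : Int → Nat → Int := updD (fun _ _ => 1000000000) (pyNorm n start) 0 0 with hd0def
  have hd0ap : ∀ x m, d0 x m = if x = pyNorm n start ∧ m = 0 then 0 else 1000000000 := by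
    intro x m
    simp [hd0def, updD]
  have hd0s : d0 (pyNorm n start) 0 = 0 := by
    rw [hd0ap]
    simp
  have hd0b : ∀ x m, d0 x m ≤ 1000000000 := by
    intro x m
    rw [hd0ap]
    split_ifs <;> omega
  rcases hdisj with hiso | ⟨hshape, hpair⟩
  · -- start lies on no road: both searches stop after popping the start state
    have hadjs : aAdj roads start = [] := by
      rw [List.eq_nil_iff_forall_not_mem]
      intro e he
      rcases aAdj_mem_aux roads (fun _ => []) start e he with h | ⟨r, hr, a, b, w', hreq, hcase⟩
      · simp at h
      · refine hiso (List.mem_flatMap.2 ⟨r, hr, ?_⟩)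
        subst hreq
        rcases hcase with ⟨h1, -⟩ | ⟨h1, -⟩ <;> rw [h1] <;> simp
    have hA : aLoop (aAdj roads) (mkTrapIds traps) n
        ((n.toNat + 1) * 2 ^ traps.length * 1000000000 + 2) d0 [(0, start, 0)] = d0 :=
      aLoop_iso _ _ _ _ _ _ hadjs hd0s
    have hB : bLoop (aAdj roads) (mkTrapIds traps) n
        ((n.toNat + 1) * 2 ^ traps.length * 1000000000 + 2) d0 [(start, 0)]
        (PySem.Set.ofList [(start, 0)]) = d0 :=
      bLoop_iso _ _ _ _ _ _ _ hadjs
    rw [hA, hB]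
    exact final_min_eq _ _ (Nat.two_pow_pos _) (fun m => hd0b _ m)
  · -- the searched part of the maze is well-formed: both worklists converge to
    -- the unique stable table
    have hroads : ∀ r ∈ roads, r.length = 3 ∧
        (∀ x ∈ r.take 2, -(n + 1) ≤ x ∧ x ≤ n) ∧ (∀ x ∈ r.drop 2, 0 ≤ x) :=
      fun r hr => ⟨hlen3 r hr, (hshape r hr).1, (hshape r hr).2⟩
    have hnodes : ∀ x ∈ rdNodes roads, -(n + 1) ≤ x ∧ x ≤ n := by
      intro x hx
      obtain ⟨r, hr, hxr⟩ := List.mem_flatMap.1 hx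
      exact (hroads r hr).2.1 x hxr
    have hadj : ∀ u v w rev, (v, w, rev) ∈ aAdj roads u →
        v ∈ rdNodes roads ∧ u ∈ rdNodes roads ∧ 0 ≤ w := by
      intro u v w rev hmem
      rcases aAdj_mem_aux roads (fun _ => []) u (v, w, rev) hmem with h | ⟨r, hr, a, b, w', hreq, hcase⟩
      · simp at h
      · obtain ⟨hlen, htake, hdrop⟩ := hroads r hr
        subst hreq
        rcases hcase with ⟨hu, he⟩ | ⟨hu, he⟩ <;>
          rw [Prod.mk.injEq, Prod.mk.injEq] at he
        · obtain ⟨rfl, rfl, -⟩ := he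
          subst hu
          exact ⟨List.mem_flatMap.2 ⟨[u, v, w], hr, by simp⟩,
            List.mem_flatMap.2 ⟨[u, v, w], hr, by simp⟩, hdrop w (by simp)⟩
        · obtain ⟨rfl, rfl, -⟩ := he
          subst hu
          exact ⟨List.mem_flatMap.2 ⟨[v, u, w], hr, by simp⟩,
            List.mem_flatMap.2 ⟨[v, u, w], hr, by simp⟩, hdrop w (by simp)⟩
    have hinj : ∀ x ∈ start :: rdNodes roads, ∀ y ∈ start :: rdNodes roads,
        pyNorm n x = pyNorm n y → x = y := by
      intro x hx y hy hxy
      by_cases heq : x = y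
      · exact heq
      · exact hpair.forall (fun a b hab hba => (hab hba.symm).symm) hx hy heq hxy
    have hctx : Ctx n start (aAdj roads) (mkTrapIds traps) (rdNodes roads) traps.length :=
      ⟨hn, hsl, hsr, hnodes, hadj, mkTrapIds_lt traps, hinj⟩
    set K : Finset (Int × Nat) :=
      ((start :: rdNodes roads).map (pyNorm n)).toFinset ×ˢ Finset.range (2 ^ traps.length)
      with hKdef
    have hT0 : TInv n (aAdj roads) (mkTrapIds traps) start (rdNodes roads) d0 := by
      refine ⟨?_, ?_, ?_⟩
      · intro x m
        rw [hd0ap]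
        split_ifs <;> omega
      · rw [hd0s]
      · intro x m
        rw [hd0ap]
        split_ifs with h
        · refine Or.inr ⟨start, Or.inl rfl, h.1.symm, ?_⟩
          rw [h.2]
          exact Deriv.base
        · exact Or.inl rfl
    have hw0 : ∀ u v w rev, (v, w, rev) ∈ aAdj roads u → 0 ≤ w :=
      fun u v w rev h => (hadj u v w rev h).2.2
    have hSt0 : ∀ u m v w rev, (v, w, rev) ∈ aAdj roads u →
        ¬(pyNorm n u = pyNorm n start ∧ m = 0) →
        d0 (pyNorm n v) (newMask (mkTrapIds traps) v m) ≤ d0 (pyNorm n u) m + w := by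
      intro u m v w rev hmem hum
      rw [hd0ap, hd0ap (pyNorm n u), if_neg hum]
      have := hw0 u v w rev hmem
      split_ifs <;> omega
    have hstart0 : ∀ u m, (v : Int) → (w : Int) → (rev : Bool) →
        ((v, w, rev) ∈ aAdj roads u) → (pyNorm n u = pyNorm n start ∧ m = 0) →
        u = start ∧ m = 0 := by
      intro u m v w rev hmem hum
      have hun : u ∈ rdNodes roads := (hadj u v w rev hmem).2.1
      exact ⟨hinj u (List.mem_cons_of_mem _ hun) start (List.mem_cons_self ..) hum.1, hum.2⟩
    have hcard : (((start :: rdNodes roads).map (pyNorm n)).toFinset).card ≤ n.toNat + 1 := by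
      have hsub : ((start :: rdNodes roads).map (pyNorm n)).toFinset ⊆ Finset.Icc (0 : Int) n := by
        intro x hx
        rw [List.mem_toFinset] at hx
        obtain ⟨y, hy, rfl⟩ := List.mem_map.1 hx
        rcases List.mem_cons.1 hy with rfl | hy
        · exact Finset.mem_Icc.2 (pyNorm_bounds n y hsl hsr)
        · exact Finset.mem_Icc.2 (pyNorm_bounds n y (hnodes y hy).1 (hnodes y hy).2)
      have h2 := Finset.card_le_card hsub
      rw [Int.card_Icc] at h2
      omega
    have hKcard : K.card ≤ (n.toNat + 1) * 2 ^ traps.length := by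
      rw [hKdef, Finset.card_product, Finset.card_range]
      exact Nat.mul_le_mul_right _ hcard
    have hsum0 : ∑ k ∈ K, (d0 k.1 k.2).toNat ≤ K.card * 1000000000 := by
      calc ∑ k ∈ K, (d0 k.1 k.2).toNat ≤ ∑ _k ∈ K, 1000000000 := by
            refine Finset.sum_le_sum (fun k _ => ?_)
            rw [hd0ap]
            split_ifs <;> omega
        _ = K.card * 1000000000 := by rw [Finset.sum_const, smul_eq_mul]
    have hfuel : 1 + ∑ k ∈ K, (d0 k.1 k.2).toNat <
        (n.toNat + 1) * 2 ^ traps.length * 1000000000 + 2 := by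
      have h1 : K.card * 1000000000 ≤ (n.toNat + 1) * 2 ^ traps.length * 1000000000 :=
        Nat.mul_le_mul_right _ hKcard
      omega
    have hA := aLoop_good (aAdj roads) (mkTrapIds traps) n start (rdNodes roads) traps.length K
      hctx hKdef ((n.toNat + 1) * 2 ^ traps.length * 1000000000 + 2) d0 [(0, start, 0)]
      hT0
      (by
        intro e he
        simp only [List.mem_singleton] at he
        subst he
        refine ⟨Or.inl rfl, Nat.two_pow_pos _, le_refl 0, ?_, Deriv.base⟩
        rw [hd0s])
      (by
        intro u m v w rev hmem heok
        by_cases hum : pyNorm n u = pyNorm n start ∧ m = 0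
        · obtain ⟨rfl, rfl⟩ := hstart0 u m v w rev hmem hum
          refine Or.inr (Or.inl ?_)
          rw [hd0s]
          simp
        · exact Or.inl (hSt0 u m v w rev hmem hum))
      (by simp only [List.length_singleton]; omega)
    have hB := bLoop_good (aAdj roads) (mkTrapIds traps) n start (rdNodes roads) traps.length K
      hctx hKdef ((n.toNat + 1) * 2 ^ traps.length * 1000000000 + 2) d0 [(start, 0)]
      (PySem.Set.ofList [(start, 0)]) hT0
      (by
        intro e he
        simp only [List.mem_singleton] at he
        subst he
        exact ⟨Or.inl rfl, Nat.two_pow_pos _⟩)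
      (List.nodup_singleton _)
      (fun x => by rw [PySem.Set.mem_ofList])
      (by
        intro u m v w rev hmem heok
        by_cases hum : pyNorm n u = pyNorm n start ∧ m = 0
        · obtain ⟨rfl, rfl⟩ := hstart0 u m v w rev hmem hum
          exact Or.inr (Or.inl (by simp))
        · exact Or.inl (hSt0 u m v w rev hmem hum))
      (by simp only [List.length_singleton]; omega)
    have heq := tables_eq n (aAdj roads) (mkTrapIds traps) start (rdNodes roads)
      _ _ hA.1 hB.1 hA.2 hB.2
    rw [final_min_eq _ _ (Nat.two_pow_pos _) (fun m => ((hA.1).1 _ m).2)]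
    have hfun : (fun m => aLoop (aAdj roads) (mkTrapIds traps) n
        ((n.toNat + 1) * 2 ^ traps.length * 1000000000 + 2) d0 [(0, start, 0)] (pyNorm n end_) m) =
        (fun m => bLoop (aAdj roads) (mkTrapIds traps) n
        ((n.toNat + 1) * 2 ^ traps.length * 1000000000 + 2) d0 [(start, 0)]
        (PySem.Set.ofList [(start, 0)]) (pyNorm n end_) m) := funext (fun m => heq _ m)
    rw [hfun]
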